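-- pv_equiv track=rewrite | github.com/MWittweiler/citation_analysis | citation_analysis.py | transform_token
-- ===== SOURCE A (Python) =====
-- def transform_token(token: str)-> str:
--     """
--     Transforms a token based on predefined prefix rules.
--
--     Parameters:
--         token (str): The token to transform.
--
--     Returns:
--         str: The transformed token.
--     """
--     # Dictionary mapping prefixes to their transformations
--     prefix_map = {
--     'adt': 'att', 'Adt': 'Att', 'adp': 'app', 'Adp': 'App', 'adc': 'acc', 'Adc': 'Acc',
--     'adg': 'agg', 'Adg': 'Agg', 'adf': 'aff', 'Adf': 'Aff', 'adl': 'all', 'Adl': 'All',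
--     'adr': 'arr', 'Adr': 'Arr', 'ads': 'ass', 'Ads': 'Ass', 'adqu': 'acqu', 'Adqu': 'Acqu',
--     'inm': 'imm', 'Inm': 'Imm', 'inl': 'ill', 'Inl': 'Ill', 'inr': 'irr', 'Inr': 'Irr',
--     'inb': 'imb', 'Inb': 'Imb', 'conm': 'comm', 'Conm': 'Comm', 'conl': 'coll', 'Conl': 'Coll',
--     'conr': 'corr', 'Conr': 'Corr', 'conb': 'comb', 'Conb': 'Comb', 'conp': 'comp', 'Conp': 'Comp'}
--     vowels = 'aeiou'
--     # Determine if the token starts with a recognized prefix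
--     for prefix, replacement in prefix_map.items():
--         if token.lower().startswith(prefix):
--             # Special handling for 'ads'/'Ads'
--             if prefix.lower() == 'ads' and len(token) > 3:
--                 if token[3].lower() in vowels:
--                     # Only apply replacement if followed by a vowel
--                     new_start = token[0] + replacement[1:]  # Assimilate (eg. adserit > asserit)
--                     return new_start + token[3:]
--                 else:
--                     new_start = token[0] + token[2:] # Keep simple consonant before consonant (eg. adstringit > astringit)
--                     return new_start
--             elif prefix.lower() != 'ads':  # Apply other transformations directly
--                 new_start = token[0] + replacement[1:]  # Maintain case of the first letter
--                 return new_start + token[len(prefix):]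
--             break  # Exit the loop after finding the first matching prefix
--     return token  # Return the token unchanged if no prefix matches
-- ===== SOURCE B (Python) =====
-- def transform_token(token: str) -> str:
--     """Family dispatch: classify the prefix family (ad-/in-/con-) by slicing and
--     COMPUTE the assimilated cluster (consonant doubling / nasal change) instead of
--     scanning a prefix->replacement table."""
--     low = token.lower()
--     if low[:3] == 'ads':
--         if len(token) <= 3:
--             return token
--         if token[3].lower() in 'aeiou':
--             return token[0] + 'ss' + token[3:]
--         return token[0] + token[2:]
--     if low[:2] == 'ad':
--         c = low[2:3]
--         if c == 'q':
--             return token[0] + 'cqu' + token[4:] if low[:4] == 'adqu' else token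
--         if c and c in 'tpcgflr':
--             return token[0] + c + c + token[3:]
--         return token
--     if low[:2] == 'in':
--         c = low[2:3]
--         if c and c in 'mlrb':
--             return token[0] + ('m' if c == 'b' else c) + c + token[3:]
--         return token
--     if low[:3] == 'con':
--         c = low[3:4]
--         if c and c in 'mlrbp':
--             return token[0] + 'o' + ('m' if c in 'bp' else c) + c + token[4:]
--         return token
--     return token
-- ===== Notes on version B (the rewrite author's own statement) =====
-- stated objective: simpler
-- what changed: Replaced the 34-entry prefix->replacement table scan (which re-lowercases the whole token for each entry's startswith test) by a direct family dispatch that lowercases once, slices off the ad-/in-/con- stem and computes the assimilated cluster (consonant doubling, b/p->m nasal change) from the following consonant.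
import Mathlib
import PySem

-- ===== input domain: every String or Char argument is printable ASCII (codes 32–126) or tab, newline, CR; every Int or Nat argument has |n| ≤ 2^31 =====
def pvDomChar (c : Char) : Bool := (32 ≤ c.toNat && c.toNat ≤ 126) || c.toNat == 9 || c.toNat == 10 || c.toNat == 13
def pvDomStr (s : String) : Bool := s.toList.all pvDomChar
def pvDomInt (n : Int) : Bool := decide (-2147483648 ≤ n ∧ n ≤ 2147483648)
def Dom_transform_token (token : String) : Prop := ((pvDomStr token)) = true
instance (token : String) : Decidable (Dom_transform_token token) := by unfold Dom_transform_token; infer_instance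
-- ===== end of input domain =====

-- B replaces A's 34-entry prefix-table scan by a family dispatch that computes each
-- assimilated cluster from the consonant after the ad-/in-/con- stem (objective: simpler).

-- ===== PORT A =====
-- prefix_map, in insertion order; prefixes/replacements kept as char lists ("adt".toList etc. written out)
def pvPrefixMap : List (List Char × List Char) :=
  [(['a','d','t'], ['a','t','t']), (['A','d','t'], ['A','t','t']),
   (['a','d','p'], ['a','p','p']), (['A','d','p'], ['A','p','p']),
   (['a','d','c'], ['a','c','c']), (['A','d','c'], ['A','c','c']),
   (['a','d','g'], ['a','g','g']), (['A','d','g'], ['A','g','g']),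
   (['a','d','f'], ['a','f','f']), (['A','d','f'], ['A','f','f']),
   (['a','d','l'], ['a','l','l']), (['A','d','l'], ['A','l','l']),
   (['a','d','r'], ['a','r','r']), (['A','d','r'], ['A','r','r']),
   (['a','d','s'], ['a','s','s']), (['A','d','s'], ['A','s','s']),
   (['a','d','q','u'], ['a','c','q','u']), (['A','d','q','u'], ['A','c','q','u']),
   (['i','n','m'], ['i','m','m']), (['I','n','m'], ['I','m','m']),
   (['i','n','l'], ['i','l','l']), (['I','n','l'], ['I','l','l']),
   (['i','n','r'], ['i','r','r']), (['I','n','r'], ['I','r','r']),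
   (['i','n','b'], ['i','m','b']), (['I','n','b'], ['I','m','b']),
   (['c','o','n','m'], ['c','o','m','m']), (['C','o','n','m'], ['C','o','m','m']),
   (['c','o','n','l'], ['c','o','l','l']), (['C','o','n','l'], ['C','o','l','l']),
   (['c','o','n','r'], ['c','o','r','r']), (['C','o','n','r'], ['C','o','r','r']),
   (['c','o','n','b'], ['c','o','m','b']), (['C','o','n','b'], ['C','o','m','b']),
   (['c','o','n','p'], ['c','o','m','p']), (['C','o','n','p'], ['C','o','m','p'])]

def pvVowels : List Char := ['a','e','i','o','u']

-- the for-loop over prefix_map.items(), with its early returns and the final break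
-- (token[0] is tok.take 1: reached only under a matched non-empty prefix, so never on "")
def pvGoA (tok : List Char) : List (List Char × List Char) → List Char
  | [] => tok
  | (pfx, repl) :: rest =>
    if PySem.Chars.startswith (PySem.Chars.lower tok) pfx then
      if PySem.Chars.lower pfx = ['a','d','s'] ∧ tok.length > 3 then
        match PySem.List.pyGet? tok 3 with
        | some c =>
          if PySem.Chars.lowerChar c ∈ pvVowels then
            tok.take 1 ++ repl.drop 1 ++ PySem.List.slice tok (some 3) none
          else
            tok.take 1 ++ PySem.List.slice tok (some 2) none
        | none => tok  -- unreachable: guarded by tok.length > 3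
      else if PySem.Chars.lower pfx ≠ ['a','d','s'] then
        tok.take 1 ++ repl.drop 1 ++ PySem.List.slice tok (some (pfx.length : Int)) none
      else tok  -- break: fall through to the final return
    else pvGoA tok rest

def transform_token (token : String) : String :=
  String.ofList (pvGoA token.toList pvPrefixMap)

-- ===== PORT B =====
-- family dispatch on char lists; low[2:3] / low[3:4] are ≤1-char slices, matched directly
def pvAltGo (tok : List Char) : List Char :=
  let low := PySem.Chars.lower tok
  if PySem.List.slice low none (some 3) = ['a','d','s'] then
    if tok.length ≤ 3 then tok
    else
      match PySem.List.pyGet? tok 3 with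
      | some c =>
        if PySem.Chars.lowerChar c ∈ pvVowels then
          tok.take 1 ++ ['s','s'] ++ PySem.List.slice tok (some 3) none
        else
          tok.take 1 ++ PySem.List.slice tok (some 2) none
      | none => tok  -- unreachable: tok.length > 3
  else if PySem.List.slice low none (some 2) = ['a','d'] then
    match PySem.List.slice low (some 2) (some 3) with
    | ['q'] =>
      if PySem.List.slice low none (some 4) = ['a','d','q','u'] then
        tok.take 1 ++ ['c','q','u'] ++ PySem.List.slice tok (some 4) none
      else tok
    | [c] =>
      if c ∈ ['t','p','c','g','f','l','r'] then
        tok.take 1 ++ [c, c] ++ PySem.List.slice tok (some 3) none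
      else tok
    | _ => tok
  else if PySem.List.slice low none (some 2) = ['i','n'] then
    match PySem.List.slice low (some 2) (some 3) with
    | [c] =>
      if c ∈ ['m','l','r','b'] then
        tok.take 1 ++ [(if c = 'b' then 'm' else c), c] ++ PySem.List.slice tok (some 3) none
      else tok
    | _ => tok
  else if PySem.List.slice low none (some 3) = ['c','o','n'] then
    match PySem.List.slice low (some 3) (some 4) with
    | [c] =>
      if c ∈ ['m','l','r','b','p'] then
        tok.take 1 ++ ['o', (if c = 'b' ∨ c = 'p' then 'm' else c), c] ++ PySem.List.slice tok (some 4) none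
      else tok
    | _ => tok
  else tok

def transform_token_alt (token : String) : String :=
  String.ofList (pvAltGo token.toList)

-- ===== PRECONDITION & SPEC =====
def Spec_transform_token (token : String) (out : String) : Prop := out = transform_token_alt token
instance (token : String) (out : String) : Decidable (Spec_transform_token token out) := by unfold Spec_transform_token; infer_instance

-- ===== CLAIM (what is proved, stated in full; the proofs are below) =====
def Claim_equal_transform_token : Prop := ∀ (token : String), Dom_transform_token token → Spec_transform_token token (transform_token token)

-- ===== LEMMAS AND PROOFS =====
theorem lc_ne (c u : Char) (h1 : 65 ≤ u.toNat) (h2 : u.toNat ≤ 90) : PySem.Chars.lowerChar c ≠ u := by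
  unfold PySem.Chars.lowerChar PySem.Chars.isupper
  have e1 : 'A'.val.toNat = 65 := rfl
  have e2 : 'Z'.val.toNat = 90 := rfl
  have hval : c.toNat = c.val.toNat := rfl
  split_ifs with h
  · simp only [Bool.and_eq_true, decide_eq_true_eq, Char.le_def, UInt32.le_iff_toNat_le] at h
    intro he
    have := congrArg Char.toNat he
    rw [Char.toNat_ofNat] at this
    rw [if_pos (by constructor; show c.toNat + 32 < 0xD800; omega : (c.toNat + 32).isValidChar)] at this
    omega
  · simp only [Bool.and_eq_true, decide_eq_true_eq, Char.le_def, UInt32.le_iff_toNat_le, not_and_or, not_le] at h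
    intro he; subst he
    rcases h with h | h <;> omega

theorem lcl_a : PySem.Chars.lowerChar 'a' = 'a' := by decide
theorem lcl_d : PySem.Chars.lowerChar 'd' = 'd' := by decide
theorem lcl_s : PySem.Chars.lowerChar 's' = 's' := by decide
theorem lcl_q : PySem.Chars.lowerChar 'q' = 'q' := by decide
theorem lcl_u : PySem.Chars.lowerChar 'u' = 'u' := by decide
theorem lcl_t : PySem.Chars.lowerChar 't' = 't' := by decide
theorem lcl_p : PySem.Chars.lowerChar 'p' = 'p' := by decide
theorem lcl_c : PySem.Chars.lowerChar 'c' = 'c' := by decide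
theorem lcl_g : PySem.Chars.lowerChar 'g' = 'g' := by decide
theorem lcl_f : PySem.Chars.lowerChar 'f' = 'f' := by decide
theorem lcl_l : PySem.Chars.lowerChar 'l' = 'l' := by decide
theorem lcl_r : PySem.Chars.lowerChar 'r' = 'r' := by decide
theorem lcl_i : PySem.Chars.lowerChar 'i' = 'i' := by decide
theorem lcl_n : PySem.Chars.lowerChar 'n' = 'n' := by decide
theorem lcl_m : PySem.Chars.lowerChar 'm' = 'm' := by decide
theorem lcl_o : PySem.Chars.lowerChar 'o' = 'o' := by decide
theorem lcl_b : PySem.Chars.lowerChar 'b' = 'b' := by decide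
theorem lcl_Au : PySem.Chars.lowerChar 'A' = 'a' := by decide
theorem lcl_Iu : PySem.Chars.lowerChar 'I' = 'i' := by decide
theorem lcl_Cu : PySem.Chars.lowerChar 'C' = 'c' := by decide
theorem lcA (x : Char) : (PySem.Chars.lowerChar x = 'A') = False := eq_false (lc_ne x 'A' (by decide) (by decide))
theorem lcI (x : Char) : (PySem.Chars.lowerChar x = 'I') = False := eq_false (lc_ne x 'I' (by decide) (by decide))
theorem lcC (x : Char) : (PySem.Chars.lowerChar x = 'C') = False := eq_false (lc_ne x 'C' (by decide) (by decide))

set_option maxHeartbeats 1000000 in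
theorem pvMain4 (a b c d : Char) (rest : List Char) : pvGoA (a::b::c::d::rest) pvPrefixMap = pvAltGo (a::b::c::d::rest) := by
  have h34 : 3 < (a::b::c::d::rest).length := by simp
  have hlenB : ¬ ((a::b::c::d::rest).length ≤ 3) := by simp
  by_cases ha : PySem.Chars.lowerChar a = 'a'
  · by_cases hb : PySem.Chars.lowerChar b = 'd'
    · by_cases hs : PySem.Chars.lowerChar c = 's'
      · by_cases hv : PySem.Chars.lowerChar d ∈ pvVowels <;>
          (simp [pvGoA, pvPrefixMap, pvAltGo, lcl_a, lcl_d, lcl_s, lcl_q, lcl_u, lcl_t, lcl_p, lcl_c, lcl_g, lcl_f, lcl_l, lcl_r, lcl_i, lcl_n, lcl_m, lcl_o, lcl_b, lcl_Au, lcl_Iu, lcl_Cu, hlenB, PySem.Chars.lower, PySem.Chars.startswith,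
                List.isPrefixOf, PySem.List.slice, PySem.List.pyGet?_of_nonneg, lcA, lcI, lcC, ha, hb, hs, hv, h34]) <;> simp_all [eq_comm]
      · by_cases hq : PySem.Chars.lowerChar c = 'q'
        · by_cases hu : PySem.Chars.lowerChar d = 'u' <;>
            (simp [pvGoA, pvPrefixMap, pvAltGo, lcl_a, lcl_d, lcl_s, lcl_q, lcl_u, lcl_t, lcl_p, lcl_c, lcl_g, lcl_f, lcl_l, lcl_r, lcl_i, lcl_n, lcl_m, lcl_o, lcl_b, lcl_Au, lcl_Iu, lcl_Cu, hlenB, PySem.Chars.lower, PySem.Chars.startswith,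
                  List.isPrefixOf, PySem.List.slice, PySem.List.pyGet?_of_nonneg, lcA, lcI, lcC, ha, hb, hs, hq, hu, h34]) <;> simp_all [eq_comm]
        · by_cases h1 : PySem.Chars.lowerChar c = 't'
          · (simp [pvGoA, pvPrefixMap, pvAltGo, lcl_a, lcl_d, lcl_s, lcl_q, lcl_u, lcl_t, lcl_p, lcl_c, lcl_g, lcl_f, lcl_l, lcl_r, lcl_i, lcl_n, lcl_m, lcl_o, lcl_b, lcl_Au, lcl_Iu, lcl_Cu, hlenB, PySem.Chars.lower, PySem.Chars.startswith,
                  List.isPrefixOf, PySem.List.slice, PySem.List.pyGet?_of_nonneg, lcA, lcI, lcC, ha, hb, hs, hq, h1, h34]) <;> simp_all [eq_comm]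
          · by_cases h2 : PySem.Chars.lowerChar c = 'p'
            · (simp [pvGoA, pvPrefixMap, pvAltGo, lcl_a, lcl_d, lcl_s, lcl_q, lcl_u, lcl_t, lcl_p, lcl_c, lcl_g, lcl_f, lcl_l, lcl_r, lcl_i, lcl_n, lcl_m, lcl_o, lcl_b, lcl_Au, lcl_Iu, lcl_Cu, hlenB, PySem.Chars.lower, PySem.Chars.startswith,
                    List.isPrefixOf, PySem.List.slice, PySem.List.pyGet?_of_nonneg, lcA, lcI, lcC, ha, hb, hs, hq, h1, h2, h34]) <;> simp_all [eq_comm]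
            · by_cases h3 : PySem.Chars.lowerChar c = 'c'
              · (simp [pvGoA, pvPrefixMap, pvAltGo, lcl_a, lcl_d, lcl_s, lcl_q, lcl_u, lcl_t, lcl_p, lcl_c, lcl_g, lcl_f, lcl_l, lcl_r, lcl_i, lcl_n, lcl_m, lcl_o, lcl_b, lcl_Au, lcl_Iu, lcl_Cu, hlenB, PySem.Chars.lower, PySem.Chars.startswith,
                      List.isPrefixOf, PySem.List.slice, PySem.List.pyGet?_of_nonneg, lcA, lcI, lcC, ha, hb, hs, hq, h1, h2, h3, h34]) <;> simp_all [eq_comm]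
              · by_cases h4 : PySem.Chars.lowerChar c = 'g'
                · (simp [pvGoA, pvPrefixMap, pvAltGo, lcl_a, lcl_d, lcl_s, lcl_q, lcl_u, lcl_t, lcl_p, lcl_c, lcl_g, lcl_f, lcl_l, lcl_r, lcl_i, lcl_n, lcl_m, lcl_o, lcl_b, lcl_Au, lcl_Iu, lcl_Cu, hlenB, PySem.Chars.lower, PySem.Chars.startswith,
                        List.isPrefixOf, PySem.List.slice, PySem.List.pyGet?_of_nonneg, lcA, lcI, lcC, ha, hb, hs, hq, h1, h2, h3, h4, h34]) <;> simp_all [eq_comm]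
                · by_cases h5 : PySem.Chars.lowerChar c = 'f'
                  · (simp [pvGoA, pvPrefixMap, pvAltGo, lcl_a, lcl_d, lcl_s, lcl_q, lcl_u, lcl_t, lcl_p, lcl_c, lcl_g, lcl_f, lcl_l, lcl_r, lcl_i, lcl_n, lcl_m, lcl_o, lcl_b, lcl_Au, lcl_Iu, lcl_Cu, hlenB, PySem.Chars.lower, PySem.Chars.startswith,
                          List.isPrefixOf, PySem.List.slice, PySem.List.pyGet?_of_nonneg, lcA, lcI, lcC, ha, hb, hs, hq, h1, h2, h3, h4, h5, h34]) <;> simp_all [eq_comm]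
                  · by_cases h6 : PySem.Chars.lowerChar c = 'l'
                    · (simp [pvGoA, pvPrefixMap, pvAltGo, lcl_a, lcl_d, lcl_s, lcl_q, lcl_u, lcl_t, lcl_p, lcl_c, lcl_g, lcl_f, lcl_l, lcl_r, lcl_i, lcl_n, lcl_m, lcl_o, lcl_b, lcl_Au, lcl_Iu, lcl_Cu, hlenB, PySem.Chars.lower, PySem.Chars.startswith,
                            List.isPrefixOf, PySem.List.slice, PySem.List.pyGet?_of_nonneg, lcA, lcI, lcC, ha, hb, hs, hq, h1, h2, h3, h4, h5, h6, h34]) <;> simp_all [eq_comm]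
                    · by_cases h7 : PySem.Chars.lowerChar c = 'r'
                      all_goals (simp [pvGoA, pvPrefixMap, pvAltGo, lcl_a, lcl_d, lcl_s, lcl_q, lcl_u, lcl_t, lcl_p, lcl_c, lcl_g, lcl_f, lcl_l, lcl_r, lcl_i, lcl_n, lcl_m, lcl_o, lcl_b, lcl_Au, lcl_Iu, lcl_Cu, hlenB, PySem.Chars.lower, PySem.Chars.startswith,
                              List.isPrefixOf, PySem.List.slice, PySem.List.pyGet?_of_nonneg, lcA, lcI, lcC, ha, hb, hs, hq, h1, h2, h3, h4, h5, h6, h7, h34]) <;> simp_all [eq_comm]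
    · (simp [pvGoA, pvPrefixMap, pvAltGo, lcl_a, lcl_d, lcl_s, lcl_q, lcl_u, lcl_t, lcl_p, lcl_c, lcl_g, lcl_f, lcl_l, lcl_r, lcl_i, lcl_n, lcl_m, lcl_o, lcl_b, lcl_Au, lcl_Iu, lcl_Cu, hlenB, PySem.Chars.lower, PySem.Chars.startswith,
            List.isPrefixOf, PySem.List.slice, PySem.List.pyGet?_of_nonneg, lcA, lcI, lcC, ha, hb, h34]) <;> simp_all [eq_comm]
  · by_cases hi : PySem.Chars.lowerChar a = 'i'
    · by_cases hn : PySem.Chars.lowerChar b = 'n'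
      · by_cases h1 : PySem.Chars.lowerChar c = 'm'
        · (simp [pvGoA, pvPrefixMap, pvAltGo, lcl_a, lcl_d, lcl_s, lcl_q, lcl_u, lcl_t, lcl_p, lcl_c, lcl_g, lcl_f, lcl_l, lcl_r, lcl_i, lcl_n, lcl_m, lcl_o, lcl_b, lcl_Au, lcl_Iu, lcl_Cu, hlenB, PySem.Chars.lower, PySem.Chars.startswith,
                List.isPrefixOf, PySem.List.slice, PySem.List.pyGet?_of_nonneg, lcA, lcI, lcC, ha, hi, hn, h1, h34]) <;> simp_all [eq_comm]
        · by_cases h2 : PySem.Chars.lowerChar c = 'l'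
          · (simp [pvGoA, pvPrefixMap, pvAltGo, lcl_a, lcl_d, lcl_s, lcl_q, lcl_u, lcl_t, lcl_p, lcl_c, lcl_g, lcl_f, lcl_l, lcl_r, lcl_i, lcl_n, lcl_m, lcl_o, lcl_b, lcl_Au, lcl_Iu, lcl_Cu, hlenB, PySem.Chars.lower, PySem.Chars.startswith,
                  List.isPrefixOf, PySem.List.slice, PySem.List.pyGet?_of_nonneg, lcA, lcI, lcC, ha, hi, hn, h1, h2, h34]) <;> simp_all [eq_comm]
          · by_cases h3 : PySem.Chars.lowerChar c = 'r'
            · (simp [pvGoA, pvPrefixMap, pvAltGo, lcl_a, lcl_d, lcl_s, lcl_q, lcl_u, lcl_t, lcl_p, lcl_c, lcl_g, lcl_f, lcl_l, lcl_r, lcl_i, lcl_n, lcl_m, lcl_o, lcl_b, lcl_Au, lcl_Iu, lcl_Cu, hlenB, PySem.Chars.lower, PySem.Chars.startswith,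
                    List.isPrefixOf, PySem.List.slice, PySem.List.pyGet?_of_nonneg, lcA, lcI, lcC, ha, hi, hn, h1, h2, h3, h34]) <;> simp_all [eq_comm]
            · by_cases h4 : PySem.Chars.lowerChar c = 'b'
              all_goals (simp [pvGoA, pvPrefixMap, pvAltGo, lcl_a, lcl_d, lcl_s, lcl_q, lcl_u, lcl_t, lcl_p, lcl_c, lcl_g, lcl_f, lcl_l, lcl_r, lcl_i, lcl_n, lcl_m, lcl_o, lcl_b, lcl_Au, lcl_Iu, lcl_Cu, hlenB, PySem.Chars.lower, PySem.Chars.startswith,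
                      List.isPrefixOf, PySem.List.slice, PySem.List.pyGet?_of_nonneg, lcA, lcI, lcC, ha, hi, hn, h1, h2, h3, h4, h34]) <;> simp_all [eq_comm]
      · (simp [pvGoA, pvPrefixMap, pvAltGo, lcl_a, lcl_d, lcl_s, lcl_q, lcl_u, lcl_t, lcl_p, lcl_c, lcl_g, lcl_f, lcl_l, lcl_r, lcl_i, lcl_n, lcl_m, lcl_o, lcl_b, lcl_Au, lcl_Iu, lcl_Cu, hlenB, PySem.Chars.lower, PySem.Chars.startswith,
              List.isPrefixOf, PySem.List.slice, PySem.List.pyGet?_of_nonneg, lcA, lcI, lcC, ha, hi, hn, h34]) <;> simp_all [eq_comm]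
    · by_cases hc : PySem.Chars.lowerChar a = 'c'
      · by_cases ho : PySem.Chars.lowerChar b = 'o'
        · by_cases hn2 : PySem.Chars.lowerChar c = 'n'
          · by_cases h1 : PySem.Chars.lowerChar d = 'm'
            · (simp [pvGoA, pvPrefixMap, pvAltGo, lcl_a, lcl_d, lcl_s, lcl_q, lcl_u, lcl_t, lcl_p, lcl_c, lcl_g, lcl_f, lcl_l, lcl_r, lcl_i, lcl_n, lcl_m, lcl_o, lcl_b, lcl_Au, lcl_Iu, lcl_Cu, hlenB, PySem.Chars.lower, PySem.Chars.startswith,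
                    List.isPrefixOf, PySem.List.slice, PySem.List.pyGet?_of_nonneg, lcA, lcI, lcC, ha, hi, hc, ho, hn2, h1, h34]) <;> simp_all [eq_comm]
            · by_cases h2 : PySem.Chars.lowerChar d = 'l'
              · (simp [pvGoA, pvPrefixMap, pvAltGo, lcl_a, lcl_d, lcl_s, lcl_q, lcl_u, lcl_t, lcl_p, lcl_c, lcl_g, lcl_f, lcl_l, lcl_r, lcl_i, lcl_n, lcl_m, lcl_o, lcl_b, lcl_Au, lcl_Iu, lcl_Cu, hlenB, PySem.Chars.lower, PySem.Chars.startswith,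
                      List.isPrefixOf, PySem.List.slice, PySem.List.pyGet?_of_nonneg, lcA, lcI, lcC, ha, hi, hc, ho, hn2, h1, h2, h34]) <;> simp_all [eq_comm]
              · by_cases h3 : PySem.Chars.lowerChar d = 'r'
                · (simp [pvGoA, pvPrefixMap, pvAltGo, lcl_a, lcl_d, lcl_s, lcl_q, lcl_u, lcl_t, lcl_p, lcl_c, lcl_g, lcl_f, lcl_l, lcl_r, lcl_i, lcl_n, lcl_m, lcl_o, lcl_b, lcl_Au, lcl_Iu, lcl_Cu, hlenB, PySem.Chars.lower, PySem.Chars.startswith,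
                        List.isPrefixOf, PySem.List.slice, PySem.List.pyGet?_of_nonneg, lcA, lcI, lcC, ha, hi, hc, ho, hn2, h1, h2, h3, h34]) <;> simp_all [eq_comm]
                · by_cases h4 : PySem.Chars.lowerChar d = 'b'
                  · (simp [pvGoA, pvPrefixMap, pvAltGo, lcl_a, lcl_d, lcl_s, lcl_q, lcl_u, lcl_t, lcl_p, lcl_c, lcl_g, lcl_f, lcl_l, lcl_r, lcl_i, lcl_n, lcl_m, lcl_o, lcl_b, lcl_Au, lcl_Iu, lcl_Cu, hlenB, PySem.Chars.lower, PySem.Chars.startswith,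
                          List.isPrefixOf, PySem.List.slice, PySem.List.pyGet?_of_nonneg, lcA, lcI, lcC, ha, hi, hc, ho, hn2, h1, h2, h3, h4, h34]) <;> simp_all [eq_comm]
                  · by_cases h5 : PySem.Chars.lowerChar d = 'p'
                    all_goals (simp [pvGoA, pvPrefixMap, pvAltGo, lcl_a, lcl_d, lcl_s, lcl_q, lcl_u, lcl_t, lcl_p, lcl_c, lcl_g, lcl_f, lcl_l, lcl_r, lcl_i, lcl_n, lcl_m, lcl_o, lcl_b, lcl_Au, lcl_Iu, lcl_Cu, hlenB, PySem.Chars.lower, PySem.Chars.startswith,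
                            List.isPrefixOf, PySem.List.slice, PySem.List.pyGet?_of_nonneg, lcA, lcI, lcC, ha, hi, hc, ho, hn2, h1, h2, h3, h4, h5, h34]) <;> simp_all [eq_comm]
          · (simp [pvGoA, pvPrefixMap, pvAltGo, lcl_a, lcl_d, lcl_s, lcl_q, lcl_u, lcl_t, lcl_p, lcl_c, lcl_g, lcl_f, lcl_l, lcl_r, lcl_i, lcl_n, lcl_m, lcl_o, lcl_b, lcl_Au, lcl_Iu, lcl_Cu, hlenB, PySem.Chars.lower, PySem.Chars.startswith,
                  List.isPrefixOf, PySem.List.slice, PySem.List.pyGet?_of_nonneg, lcA, lcI, lcC, ha, hi, hc, ho, hn2, h34]) <;> simp_all [eq_comm]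
        · (simp [pvGoA, pvPrefixMap, pvAltGo, lcl_a, lcl_d, lcl_s, lcl_q, lcl_u, lcl_t, lcl_p, lcl_c, lcl_g, lcl_f, lcl_l, lcl_r, lcl_i, lcl_n, lcl_m, lcl_o, lcl_b, lcl_Au, lcl_Iu, lcl_Cu, hlenB, PySem.Chars.lower, PySem.Chars.startswith,
                List.isPrefixOf, PySem.List.slice, PySem.List.pyGet?_of_nonneg, lcA, lcI, lcC, ha, hi, hc, ho, h34]) <;> simp_all [eq_comm]
      · have hlow : PySem.Chars.lower (a::b::c::d::rest) = PySem.Chars.lowerChar a :: PySem.Chars.lowerChar b :: PySem.Chars.lowerChar c :: PySem.Chars.lowerChar d :: PySem.Chars.lower rest := rfl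
        have ha2 : ('a':Char) ≠ PySem.Chars.lowerChar a := fun h => ha h.symm
        have hi2 : ('i':Char) ≠ PySem.Chars.lowerChar a := fun h => hi h.symm
        have hc2 : ('c':Char) ≠ PySem.Chars.lowerChar a := fun h => hc h.symm
        have hA2 : ('A':Char) ≠ PySem.Chars.lowerChar a := fun h => lc_ne a 'A' (by decide) (by decide) h.symm
        have hI2 : ('I':Char) ≠ PySem.Chars.lowerChar a := fun h => lc_ne a 'I' (by decide) (by decide) h.symm
        have hC2 : ('C':Char) ≠ PySem.Chars.lowerChar a := fun h => lc_ne a 'C' (by decide) (by decide) h.symm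
        simp [pvGoA, pvPrefixMap, pvAltGo, hlow, PySem.Chars.startswith, List.isPrefixOf,
              PySem.List.slice, ha, hi, hc, ha2, hi2, hc2, hA2, hI2, hC2]
set_option maxHeartbeats 1000000 in
theorem pvMain3 (a b c : Char) : pvGoA [a,b,c] pvPrefixMap = pvAltGo [a,b,c] := by
  by_cases ha : PySem.Chars.lowerChar a = 'a'
  · by_cases hb : PySem.Chars.lowerChar b = 'd'
    · by_cases hs : PySem.Chars.lowerChar c = 's'
      · (simp [pvGoA, pvPrefixMap, pvAltGo, lcl_a, lcl_d, lcl_s, lcl_q, lcl_u, lcl_t, lcl_p, lcl_c, lcl_g, lcl_f, lcl_l, lcl_r, lcl_i, lcl_n, lcl_m, lcl_o, lcl_b, lcl_Au, lcl_Iu, lcl_Cu, PySem.Chars.lower, PySem.Chars.startswith, List.isPrefixOf, PySem.List.slice, PySem.List.pyGet?_of_nonneg, lcA, lcI, lcC, ha, hb, hs]) <;> simp_all [eq_comm]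
      · by_cases hq : PySem.Chars.lowerChar c = 'q'
        · (simp [pvGoA, pvPrefixMap, pvAltGo, lcl_a, lcl_d, lcl_s, lcl_q, lcl_u, lcl_t, lcl_p, lcl_c, lcl_g, lcl_f, lcl_l, lcl_r, lcl_i, lcl_n, lcl_m, lcl_o, lcl_b, lcl_Au, lcl_Iu, lcl_Cu, PySem.Chars.lower, PySem.Chars.startswith, List.isPrefixOf, PySem.List.slice, PySem.List.pyGet?_of_nonneg, lcA, lcI, lcC, ha, hb, hs, hq]) <;> simp_all [eq_comm]
        · by_cases h1 : PySem.Chars.lowerChar c = 't'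
          · (simp [pvGoA, pvPrefixMap, pvAltGo, lcl_a, lcl_d, lcl_s, lcl_q, lcl_u, lcl_t, lcl_p, lcl_c, lcl_g, lcl_f, lcl_l, lcl_r, lcl_i, lcl_n, lcl_m, lcl_o, lcl_b, lcl_Au, lcl_Iu, lcl_Cu, PySem.Chars.lower, PySem.Chars.startswith, List.isPrefixOf, PySem.List.slice, PySem.List.pyGet?_of_nonneg, lcA, lcI, lcC, ha, hb, hs, hq, h1]) <;> simp_all [eq_comm]
          · by_cases h2 : PySem.Chars.lowerChar c = 'p'
            · (simp [pvGoA, pvPrefixMap, pvAltGo, lcl_a, lcl_d, lcl_s, lcl_q, lcl_u, lcl_t, lcl_p, lcl_c, lcl_g, lcl_f, lcl_l, lcl_r, lcl_i, lcl_n, lcl_m, lcl_o, lcl_b, lcl_Au, lcl_Iu, lcl_Cu, PySem.Chars.lower, PySem.Chars.startswith, List.isPrefixOf, PySem.List.slice, PySem.List.pyGet?_of_nonneg, lcA, lcI, lcC, ha, hb, hs, hq, h1, h2]) <;> simp_all [eq_comm]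
            · by_cases h3 : PySem.Chars.lowerChar c = 'c'
              · (simp [pvGoA, pvPrefixMap, pvAltGo, lcl_a, lcl_d, lcl_s, lcl_q, lcl_u, lcl_t, lcl_p, lcl_c, lcl_g, lcl_f, lcl_l, lcl_r, lcl_i, lcl_n, lcl_m, lcl_o, lcl_b, lcl_Au, lcl_Iu, lcl_Cu, PySem.Chars.lower, PySem.Chars.startswith, List.isPrefixOf, PySem.List.slice, PySem.List.pyGet?_of_nonneg, lcA, lcI, lcC, ha, hb, hs, hq, h1, h2, h3]) <;> simp_all [eq_comm]
              · by_cases h4 : PySem.Chars.lowerChar c = 'g'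
                · (simp [pvGoA, pvPrefixMap, pvAltGo, lcl_a, lcl_d, lcl_s, lcl_q, lcl_u, lcl_t, lcl_p, lcl_c, lcl_g, lcl_f, lcl_l, lcl_r, lcl_i, lcl_n, lcl_m, lcl_o, lcl_b, lcl_Au, lcl_Iu, lcl_Cu, PySem.Chars.lower, PySem.Chars.startswith, List.isPrefixOf, PySem.List.slice, PySem.List.pyGet?_of_nonneg, lcA, lcI, lcC, ha, hb, hs, hq, h1, h2, h3, h4]) <;> simp_all [eq_comm]
                · by_cases h5 : PySem.Chars.lowerChar c = 'f'
                  · (simp [pvGoA, pvPrefixMap, pvAltGo, lcl_a, lcl_d, lcl_s, lcl_q, lcl_u, lcl_t, lcl_p, lcl_c, lcl_g, lcl_f, lcl_l, lcl_r, lcl_i, lcl_n, lcl_m, lcl_o, lcl_b, lcl_Au, lcl_Iu, lcl_Cu, PySem.Chars.lower, PySem.Chars.startswith, List.isPrefixOf, PySem.List.slice, PySem.List.pyGet?_of_nonneg, lcA, lcI, lcC, ha, hb, hs, hq, h1, h2, h3, h4, h5]) <;> simp_all [eq_comm]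
                  · by_cases h6 : PySem.Chars.lowerChar c = 'l'
                    · (simp [pvGoA, pvPrefixMap, pvAltGo, lcl_a, lcl_d, lcl_s, lcl_q, lcl_u, lcl_t, lcl_p, lcl_c, lcl_g, lcl_f, lcl_l, lcl_r, lcl_i, lcl_n, lcl_m, lcl_o, lcl_b, lcl_Au, lcl_Iu, lcl_Cu, PySem.Chars.lower, PySem.Chars.startswith, List.isPrefixOf, PySem.List.slice, PySem.List.pyGet?_of_nonneg, lcA, lcI, lcC, ha, hb, hs, hq, h1, h2, h3, h4, h5, h6]) <;> simp_all [eq_comm]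
                    · by_cases h7 : PySem.Chars.lowerChar c = 'r'
                      all_goals (simp [pvGoA, pvPrefixMap, pvAltGo, lcl_a, lcl_d, lcl_s, lcl_q, lcl_u, lcl_t, lcl_p, lcl_c, lcl_g, lcl_f, lcl_l, lcl_r, lcl_i, lcl_n, lcl_m, lcl_o, lcl_b, lcl_Au, lcl_Iu, lcl_Cu, PySem.Chars.lower, PySem.Chars.startswith, List.isPrefixOf, PySem.List.slice, PySem.List.pyGet?_of_nonneg, lcA, lcI, lcC, ha, hb, hs, hq, h1, h2, h3, h4, h5, h6, h7]) <;> simp_all [eq_comm]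
    · (simp [pvGoA, pvPrefixMap, pvAltGo, lcl_a, lcl_d, lcl_s, lcl_q, lcl_u, lcl_t, lcl_p, lcl_c, lcl_g, lcl_f, lcl_l, lcl_r, lcl_i, lcl_n, lcl_m, lcl_o, lcl_b, lcl_Au, lcl_Iu, lcl_Cu, PySem.Chars.lower, PySem.Chars.startswith, List.isPrefixOf, PySem.List.slice, PySem.List.pyGet?_of_nonneg, lcA, lcI, lcC, ha, hb]) <;> simp_all [eq_comm]
  · by_cases hi : PySem.Chars.lowerChar a = 'i'
    · by_cases hn : PySem.Chars.lowerChar b = 'n'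
      · by_cases h1 : PySem.Chars.lowerChar c = 'm'
        · (simp [pvGoA, pvPrefixMap, pvAltGo, lcl_a, lcl_d, lcl_s, lcl_q, lcl_u, lcl_t, lcl_p, lcl_c, lcl_g, lcl_f, lcl_l, lcl_r, lcl_i, lcl_n, lcl_m, lcl_o, lcl_b, lcl_Au, lcl_Iu, lcl_Cu, PySem.Chars.lower, PySem.Chars.startswith, List.isPrefixOf, PySem.List.slice, PySem.List.pyGet?_of_nonneg, lcA, lcI, lcC, ha, hi, hn, h1]) <;> simp_all [eq_comm]
        · by_cases h2 : PySem.Chars.lowerChar c = 'l'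
          · (simp [pvGoA, pvPrefixMap, pvAltGo, lcl_a, lcl_d, lcl_s, lcl_q, lcl_u, lcl_t, lcl_p, lcl_c, lcl_g, lcl_f, lcl_l, lcl_r, lcl_i, lcl_n, lcl_m, lcl_o, lcl_b, lcl_Au, lcl_Iu, lcl_Cu, PySem.Chars.lower, PySem.Chars.startswith, List.isPrefixOf, PySem.List.slice, PySem.List.pyGet?_of_nonneg, lcA, lcI, lcC, ha, hi, hn, h1, h2]) <;> simp_all [eq_comm]
          · by_cases h3 : PySem.Chars.lowerChar c = 'r'
            · (simp [pvGoA, pvPrefixMap, pvAltGo, lcl_a, lcl_d, lcl_s, lcl_q, lcl_u, lcl_t, lcl_p, lcl_c, lcl_g, lcl_f, lcl_l, lcl_r, lcl_i, lcl_n, lcl_m, lcl_o, lcl_b, lcl_Au, lcl_Iu, lcl_Cu, PySem.Chars.lower, PySem.Chars.startswith, List.isPrefixOf, PySem.List.slice, PySem.List.pyGet?_of_nonneg, lcA, lcI, lcC, ha, hi, hn, h1, h2, h3]) <;> simp_all [eq_comm]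
            · by_cases h4 : PySem.Chars.lowerChar c = 'b'
              all_goals (simp [pvGoA, pvPrefixMap, pvAltGo, lcl_a, lcl_d, lcl_s, lcl_q, lcl_u, lcl_t, lcl_p, lcl_c, lcl_g, lcl_f, lcl_l, lcl_r, lcl_i, lcl_n, lcl_m, lcl_o, lcl_b, lcl_Au, lcl_Iu, lcl_Cu, PySem.Chars.lower, PySem.Chars.startswith, List.isPrefixOf, PySem.List.slice, PySem.List.pyGet?_of_nonneg, lcA, lcI, lcC, ha, hi, hn, h1, h2, h3, h4]) <;> simp_all [eq_comm]
      · (simp [pvGoA, pvPrefixMap, pvAltGo, lcl_a, lcl_d, lcl_s, lcl_q, lcl_u, lcl_t, lcl_p, lcl_c, lcl_g, lcl_f, lcl_l, lcl_r, lcl_i, lcl_n, lcl_m, lcl_o, lcl_b, lcl_Au, lcl_Iu, lcl_Cu, PySem.Chars.lower, PySem.Chars.startswith, List.isPrefixOf, PySem.List.slice, PySem.List.pyGet?_of_nonneg, lcA, lcI, lcC, ha, hi, hn]) <;> simp_all [eq_comm]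
    · by_cases hc2 : PySem.Chars.lowerChar a = 'c'
      · (simp [pvGoA, pvPrefixMap, pvAltGo, lcl_a, lcl_d, lcl_s, lcl_q, lcl_u, lcl_t, lcl_p, lcl_c, lcl_g, lcl_f, lcl_l, lcl_r, lcl_i, lcl_n, lcl_m, lcl_o, lcl_b, lcl_Au, lcl_Iu, lcl_Cu, PySem.Chars.lower, PySem.Chars.startswith, List.isPrefixOf, PySem.List.slice, PySem.List.pyGet?_of_nonneg, lcA, lcI, lcC, ha, hi, hc2]) <;> simp_all [eq_comm]
      · have ha2 : ('a':Char) ≠ PySem.Chars.lowerChar a := fun h => ha h.symm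
        have hi2 : ('i':Char) ≠ PySem.Chars.lowerChar a := fun h => hi h.symm
        have hc3 : ('c':Char) ≠ PySem.Chars.lowerChar a := fun h => hc2 h.symm
        have hA2 : ('A':Char) ≠ PySem.Chars.lowerChar a := fun h => lc_ne a 'A' (by decide) (by decide) h.symm
        have hI2 : ('I':Char) ≠ PySem.Chars.lowerChar a := fun h => lc_ne a 'I' (by decide) (by decide) h.symm
        have hC2 : ('C':Char) ≠ PySem.Chars.lowerChar a := fun h => lc_ne a 'C' (by decide) (by decide) h.symm
        simp [pvGoA, pvPrefixMap, pvAltGo, PySem.Chars.lower, PySem.Chars.startswith, List.isPrefixOf,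
              PySem.List.slice, ha, hi, hc2, ha2, hi2, hc3, hA2, hI2, hC2]
theorem pvMain (tok : List Char) : pvGoA tok pvPrefixMap = pvAltGo tok := by
  match tok with
  | [] => decide
  | [a] =>
    simp [pvGoA, pvPrefixMap, pvAltGo, PySem.Chars.lower, PySem.Chars.startswith, List.isPrefixOf, PySem.List.slice]
  | [a,b] =>
    simp [pvGoA, pvPrefixMap, pvAltGo, PySem.Chars.lower, PySem.Chars.startswith, List.isPrefixOf, PySem.List.slice]
  | [a,b,c] => exact pvMain3 a b c
  | a::b::c::d::rest => exact pvMain4 a b c d rest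

-- ===== VERDICT (by name: the statement is the Claim_ definition above) =====
theorem transform_token_spec : Claim_equal_transform_token := by
  intro token _
  unfold Spec_transform_token transform_token transform_token_alt
  rw [pvMain]
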